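-- pv_equiv track=rewrite | github.com/t-kenji/cifter | src/cifter/render.py | _rendered_column_for_source_column
-- ===== SOURCE A (Python) =====
-- TAB_SIZE = 4
--
-- def _rendered_column_for_source_column(source_text: str, source_column: int) -> int:
--     rendered_column = 0
--     for char in source_text[: max(0, min(source_column, len(source_text)))]:
--         if char == "\t":
--             rendered_column += TAB_SIZE - (rendered_column % TAB_SIZE)
--             continue
--         rendered_column += 1
--     return rendered_column
-- ===== SOURCE B (Python) =====
-- TAB_SIZE = 4
--
-- def _rendered_column_for_source_column(source_text: str, source_column: int) -> int:
--     prefix = source_text[: max(0, min(source_column, len(source_text)))]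
--     segments = prefix.split("\t")
--     last = len(segments) - 1
--     column = 0
--     for i, segment in enumerate(segments):
--         column += len(segment)
--         if i != last:
--             column += TAB_SIZE - column % TAB_SIZE
--     return column
-- ===== Notes on version B (the rewrite author's own statement) =====
-- stated objective: faster
-- what changed: Replaces the per-character loop (with a tab-stop jump computed at each tab) by splitting the clamped prefix on '\t' and folding over the segments, adding each segment's length in bulk plus one tab-stop jump after every non-last segment.
import Mathlib
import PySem

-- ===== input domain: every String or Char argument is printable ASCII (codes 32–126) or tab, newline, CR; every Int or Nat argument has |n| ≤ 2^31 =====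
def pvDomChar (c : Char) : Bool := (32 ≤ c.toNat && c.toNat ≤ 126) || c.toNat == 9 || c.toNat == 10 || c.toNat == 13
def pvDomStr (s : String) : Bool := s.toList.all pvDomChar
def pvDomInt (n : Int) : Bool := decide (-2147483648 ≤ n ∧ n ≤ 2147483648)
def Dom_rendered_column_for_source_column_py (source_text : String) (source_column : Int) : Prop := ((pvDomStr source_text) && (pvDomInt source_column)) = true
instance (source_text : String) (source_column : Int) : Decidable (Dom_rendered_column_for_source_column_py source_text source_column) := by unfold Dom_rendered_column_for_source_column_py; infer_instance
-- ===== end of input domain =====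

-- B computes the same column by splitting the prefix on tabs and adding segment lengths in bulk
-- (one tab-stop jump between consecutive segments) instead of stepping per character.

-- ===== PORT A =====
-- A's loop body: per-character update of the rendered column
def pvStepA (rendered_column : Int) (char : Char) : Int :=
  if char = '\t' then rendered_column + (4 - PySem.Int.mod rendered_column 4)
  else rendered_column + 1

-- literal port of A: char-by-char loop over source_text[:max(0, min(source_column, len(source_text)))]
def rendered_column_for_source_column_py (source_text : String) (source_column : Int) : Int :=
  (PySem.List.slice source_text.toList none
      (some (max 0 (min source_column (PySem.List.len source_text.toList))))).foldl pvStepA 0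

-- ===== PORT B =====
-- B's loop body: add the segment's length, and jump to the next tab stop unless it is the last segment
def pvStepB (last : Int) (column : Int) (p : Int × List Char) : Int :=
  let column := column + PySem.List.len p.2
  if p.1 ≠ last then column + (4 - PySem.Int.mod column 4) else column

-- literal port of B: prefix.split("\t") (single-char separator = List.splitOn), then an
-- enumerate-fold over the segments
def rendered_column_for_source_column_py_alt (source_text : String) (source_column : Int) : Int :=
  let pre := PySem.List.slice source_text.toList none
      (some (max 0 (min source_column (PySem.List.len source_text.toList))))
  let segments := pre.splitOn '\t'
  (PySem.List.enumerate segments).foldl (pvStepB (PySem.List.len segments - 1)) 0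

-- ===== PRECONDITION & SPEC =====
def Spec_rendered_column_for_source_column_py (source_text : String) (source_column : Int) (out : Int) : Prop := out = rendered_column_for_source_column_py_alt source_text source_column
instance (source_text : String) (source_column : Int) (out : Int) : Decidable (Spec_rendered_column_for_source_column_py source_text source_column out) := by unfold Spec_rendered_column_for_source_column_py; infer_instance

-- ===== CLAIM (what is proved, stated in full; the proofs are below) =====
def Claim_equal_rendered_column_for_source_column_py : Prop := ∀ (source_text : String) (source_column : Int), Dom_rendered_column_for_source_column_py source_text source_column → Spec_rendered_column_for_source_column_py source_text source_column (rendered_column_for_source_column_py source_text source_column)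

-- ===== LEMMAS AND PROOFS =====

-- common reference function: consume the segment list left to right, adding lengths,
-- jumping to the next tab stop between consecutive segments
def pvRcol : Int → List (List Char) → Int
  | col, [] => col
  | col, [s] => col + (s.length : Int)
  | col, s :: r :: rest =>
      let c := col + (s.length : Int)
      pvRcol (c + (4 - PySem.Int.mod c 4)) (r :: rest)

-- B's enumerate-fold computes pvRcol (for any start index st, with last = st + len - 1)
theorem pvFoldB_eq (segs : List (List Char)) : ∀ (st col : Int),
    (PySem.List.enumerate segs st).foldl (pvStepB (st + (segs.length : Int) - 1)) col
      = pvRcol col segs := by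
  induction segs with
  | nil => intro st col; simp [PySem.List.enumerate_nil, pvRcol]
  | cons s rest ih =>
    intro st col
    rw [PySem.List.enumerate_cons, List.foldl_cons]
    cases rest with
    | nil =>
      simp [PySem.List.enumerate_nil, pvStepB, pvRcol]
    | cons r rest' =>
      have hne : st ≠ st + ((s :: r :: rest').length : Int) - 1 := by
        simp only [List.length_cons]; push_cast; omega
      have harith : st + 1 + ((r :: rest').length : Int) - 1
          = st + ((s :: r :: rest').length : Int) - 1 := by
        simp only [List.length_cons]; push_cast; omega
      have ih' := ih (st + 1) (pvStepB (st + ((s :: r :: rest').length : Int) - 1) col (st, s))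
      rw [harith] at ih'
      rw [ih']
      simp [pvStepB, pvRcol]
      rw [if_neg (by omega)]

-- A's char loop computes pvRcol over the tab-split of the list (from a nonnegative column)
theorem pvFoldA_eq (l : List Char) : ∀ (col : Int), 0 ≤ col →
    l.foldl pvStepA col = pvRcol col (l.splitOn '\t') := by
  induction l with
  | nil => intro col _; simp [List.splitOn, List.splitOnP_nil, pvRcol]
  | cons c l ih =>
    intro col hcol
    have hjump : ∀ x : Int, 0 ≤ x → 0 ≤ x + (4 - PySem.Int.mod x 4) := by
      intro x hx
      have h1 := PySem.Int.mod_nonneg x (b := 4) (by omega)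
      have h2 := PySem.Int.mod_lt x (b := 4) (by omega)
      omega
    obtain ⟨s, rest, hsr⟩ := List.exists_cons_of_ne_nil (List.splitOnP_ne_nil (· == '\t') l)
    by_cases hc : c = '\t'
    · subst hc
      rw [List.foldl_cons, show pvStepA col '\t' = col + (4 - PySem.Int.mod col 4) by
        simp [pvStepA]]
      rw [ih _ (hjump col hcol)]
      simp only [List.splitOn, List.splitOnP_cons, beq_self_eq_true, if_pos] at hsr ⊢
      rw [hsr]
      simp [pvRcol]
    · rw [List.foldl_cons, show pvStepA col c = col + 1 by simp [pvStepA, hc]]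
      rw [ih _ (by omega)]
      simp only [List.splitOn, List.splitOnP_cons, beq_iff_eq, if_neg hc] at hsr ⊢
      rw [hsr]
      simp only [List.modifyHead]
      cases rest with
      | nil => simp only [pvRcol, List.length_cons]; push_cast; ring
      | cons r rest' =>
        simp only [pvRcol, List.length_cons]
        push_cast
        ring_nf

-- ===== VERDICT (by name: the statement is the Claim_ definition above) =====
theorem rendered_column_for_source_column_py_spec : Claim_equal_rendered_column_for_source_column_py := by
  intro source_text source_column _
  unfold Spec_rendered_column_for_source_column_py
  unfold rendered_column_for_source_column_py rendered_column_for_source_column_py_alt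
  set pre := PySem.List.slice source_text.toList none
      (some (max 0 (min source_column (PySem.List.len source_text.toList)))) with hpre
  simp only [PySem.List.len_eq]
  rw [pvFoldA_eq pre 0 (by omega)]
  have h := pvFoldB_eq (pre.splitOn '\t') 0 0
  simp only [zero_add] at h
  rw [h]
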